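-- pv_equiv track=rewrite | github.com/Xunhaoz/CollegeAssignment | python-assignment-7/A7-110502528-1.py | g_forward
-- ===== SOURCE A (Python) =====
-- def g_forward(arr_seat):
--     distant = 0
--     temp = []
--     for i in arr_seat:
--         if i == '0':
--             distant += 1
--             temp.append(str(distant))
--         elif i == '1':
--             distant = 0
--             temp.append(str(distant))
--     return list(map(int, temp))
-- ===== SOURCE B (Python) =====
-- def g_forward(arr_seat):
--     # Staged strategy: join the binary seat tokens into one bit-string, split it
--     # on '1' into maximal runs of '0', and emit each run as a closed-form range,
--     # with a 0 separator between consecutive runs.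
--     bits = ''.join(s for s in arr_seat if s in ('0', '1'))
--     out = []
--     for k, seg in enumerate(bits.split('1')):
--         if k:
--             out.append(0)
--         out += range(1, len(seg) + 1)
--     return out
-- ===== Notes on version B (the rewrite author's own statement) =====
-- stated objective: alternative
-- what changed: Replaces A's single pass with a mutable running counter and str/int round-tripping by a staged pipeline: filter to the binary seats, split the joined bit-string on '1' into maximal '0'-runs, and emit each run as a closed-form range(1, run+1) with a 0 separator between runs.
import Mathlib
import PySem

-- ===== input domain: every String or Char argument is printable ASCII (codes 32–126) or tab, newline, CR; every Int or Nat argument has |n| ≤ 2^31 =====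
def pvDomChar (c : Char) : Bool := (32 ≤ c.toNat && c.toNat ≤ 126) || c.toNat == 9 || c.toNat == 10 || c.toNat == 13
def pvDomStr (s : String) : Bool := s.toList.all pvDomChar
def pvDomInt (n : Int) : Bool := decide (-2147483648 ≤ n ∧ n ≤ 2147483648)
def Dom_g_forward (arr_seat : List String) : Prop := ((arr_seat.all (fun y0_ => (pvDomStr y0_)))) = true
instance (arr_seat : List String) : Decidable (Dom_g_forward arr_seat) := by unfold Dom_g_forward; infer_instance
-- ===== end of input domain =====

-- B replaces A's per-seat running counter by a staged pass — filter, split into maximal '0'-runs, emit each run as a closed-form range with 0 separators; return values are proved equal on all inputs.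
-- ===== PORT A =====
-- A's loop carried verbatim: same fold over arr_seat, same branch order ('0', then '1',
-- else skip), same running counter `distant` and same append-per-seat `temp`.
-- Python's temp holds str(distant) and the final list(map(int, temp)) reparses those
-- strings; since int(str(d)) = d for the nonnegative ints appended, the port keeps the
-- appended values in temp directly (the str/int round trip is fused; nothing else changes).
def g_forward (arr_seat : List String) : List Int :=
  (arr_seat.foldl (fun (st : Int × List Int) i =>
      if i = "0" then (st.1 + 1, st.2 ++ [st.1 + 1])
      else if i = "1" then ((0 : Int), st.2 ++ [(0 : Int)])
      else st) ((0 : Int), ([] : List Int))).2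

-- ===== PORT B =====
-- Hand port of Source B's `''.join(filtered)` + `str.split('1')`: since every filtered
-- token is exactly the one-character string "0" or "1", splitting the joined bit-string
-- on '1' is exactly this token-level split (exact on that domain; it reproduces
-- str.split's behaviour of leading/trailing/adjacent separators yielding empty segments).
def pvSplitRuns : List String → List (List String)
  | [] => [[]]
  | s :: t =>
    if s = "1" then [] :: pvSplitRuns t
    else
      match pvSplitRuns t with
      | seg :: rest => (s :: seg) :: rest
      | [] => [[s]]   -- unreachable: pvSplitRuns never returns []

def g_forward_alt (arr_seat : List String) : List Int :=
  let filtered := arr_seat.filter (fun s => s = "0" || s = "1")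
  -- for k, seg in enumerate(segments): if k: out.append(0); out += range(1, len(seg)+1)
  ((pvSplitRuns filtered).foldl
    (fun (st : Bool × List Int) seg =>
      (true,
        (if st.1 then st.2 ++ [(0 : Int)] else st.2)
          ++ PySem.List.pyRange 1 ((seg.length : Int) + 1) 1))
    (false, ([] : List Int))).2

-- ===== PRECONDITION & SPEC =====
def Spec_g_forward (arr_seat : List String) (out : List Int) : Prop := out = g_forward_alt arr_seat
instance (arr_seat : List String) (out : List Int) : Decidable (Spec_g_forward arr_seat out) := by unfold Spec_g_forward; infer_instance

-- ===== CLAIM =====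
def Claim_equal_g_forward : Prop := ∀ (arr_seat : List String), Dom_g_forward arr_seat → Spec_g_forward arr_seat (g_forward arr_seat)

-- ===== LEMMAS AND PROOFS =====

-- Direct-recursion characterisation of A's loop body.
def pvGAux : List String → Int → List Int
  | [], _ => []
  | s :: t, d =>
    if s = "0" then (d + 1) :: pvGAux t (d + 1)
    else if s = "1" then 0 :: pvGAux t 0
    else pvGAux t d

theorem pvGAux_foldA (l : List String) : ∀ (d : Int) (acc : List Int),
    (l.foldl (fun (st : Int × List Int) i =>
      if i = "0" then (st.1 + 1, st.2 ++ [st.1 + 1])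
      else if i = "1" then ((0 : Int), st.2 ++ [(0 : Int)])
      else st) (d, acc)).2 = acc ++ pvGAux l d := by
  induction l with
  | nil => intro d acc; simp [pvGAux]
  | cons s t ih =>
    intro d acc
    by_cases h0 : s = "0"
    · simp [pvGAux, h0, ih]
    · by_cases h1 : s = "1"
      · simp [pvGAux, h1, ih]
      · simp [pvGAux, h0, h1, ih]

-- A's loop skips non-binary tokens, so it only sees the filtered list.
theorem pvGAux_filter (l : List String) : ∀ d : Int,
    pvGAux (l.filter (fun s => s = "0" || s = "1")) d = pvGAux l d := by
  induction l with
  | nil => intro d; rfl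
  | cons s t ih =>
    intro d
    by_cases h0 : s = "0"
    · simp [pvGAux, h0, ih]
    · by_cases h1 : s = "1"
      · simp [pvGAux, h1, ih]
      · simp [List.filter, pvGAux, h0, h1, ih]

theorem pvSplitRuns_ne_nil (l : List String) : pvSplitRuns l ≠ [] := by
  cases l with
  | nil => simp [pvSplitRuns]
  | cons s t =>
    by_cases h : s = "1"
    · simp [pvSplitRuns, h]
    · simp only [pvSplitRuns, if_neg h]
      cases pvSplitRuns t <;> simp

-- What the segment list denotes, with the first run shifted by the incoming counter d.
def pvTailPart : List (List String) → List Int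
  | [] => []
  | seg :: rest => 0 :: (PySem.List.pyRange 1 ((seg.length : Int) + 1) 1 ++ pvTailPart rest)

theorem pvMain (l : List String) (hb : ∀ s ∈ l, s = "0" ∨ s = "1") :
    ∀ d : Int, 0 ≤ d →
    pvGAux l d
      = PySem.List.pyRange (d + 1)
          (d + (((pvSplitRuns l).headI.length : Int)) + 1) 1
        ++ pvTailPart (pvSplitRuns l).tail := by
  induction l with
  | nil =>
    intro d _
    simp [pvGAux, pvSplitRuns, pvTailPart]
  | cons s t ih =>
    intro d hd
    have hb' : ∀ x ∈ t, x = "0" ∨ x = "1" := fun x hx => hb x (List.mem_cons_of_mem _ hx)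
    by_cases h1 : s = "1"
    · have h0 : s ≠ "0" := by rw [h1]; decide
      have hrest := ih hb' 0 (by omega)
      have hne := pvSplitRuns_ne_nil t
      obtain ⟨seg, rest, hsr⟩ : ∃ seg rest, pvSplitRuns t = seg :: rest := by
        cases hh : pvSplitRuns t with
        | nil => exact absurd hh hne
        | cons a b => exact ⟨a, b, rfl⟩
      rw [hsr] at hrest
      simp only [List.headI, List.tail] at hrest
      simp only [pvGAux, if_neg h0, if_pos h1, pvSplitRuns, List.headI, List.tail,
        List.length_nil]
      rw [hrest]
      have hz : PySem.List.pyRange (d + 1) (d + (0:Int) + 1) 1 = [] := by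
        simp
      rw [hsr]
      simp only [pvTailPart]
      have : ((0:Int) + 1) = 1 := by ring
      simp [this]
    · have h0 : s = "0" := (hb s (List.mem_cons_self)).resolve_right h1
      have hrest := ih hb' (d + 1) (by omega)
      simp only [pvGAux, if_pos h0, pvSplitRuns, if_neg h1]
      obtain ⟨seg, rest, hsr⟩ : ∃ seg rest, pvSplitRuns t = seg :: rest := by
        cases hh : pvSplitRuns t with
        | nil => exact absurd hh (pvSplitRuns_ne_nil t)
        | cons a b => exact ⟨a, b, rfl⟩
      rw [hsr] at hrest ⊢
      simp only [List.headI, List.tail] at hrest ⊢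
      rw [hrest]
      have hcons : PySem.List.pyRange (d + 1)
          (d + (((s :: seg).length : Int)) + 1) 1
          = (d + 1) :: PySem.List.pyRange (d + 1 + 1)
              (d + 1 + ((seg.length : Int)) + 1) 1 := by
        have hlt : d + 1 < d + (((s :: seg).length : Int)) + 1 := by
          simp only [List.length_cons]
          push_cast
          omega
        rw [PySem.List.pyRange_one_cons hlt]
        congr 1
        congr 1
        simp only [List.length_cons]
        push_cast
        ring
      rw [hcons]
      simp

-- B's enumerate-fold, after the first segment, appends 0 :: range per segment.
theorem pvFoldB_true (segs : List (List String)) : ∀ acc : List Int,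
    (segs.foldl
      (fun (st : Bool × List Int) seg =>
        (true,
          (if st.1 then st.2 ++ [(0 : Int)] else st.2)
            ++ PySem.List.pyRange 1 ((seg.length : Int) + 1) 1))
      (true, acc)).2 = acc ++ pvTailPart segs := by
  induction segs with
  | nil => intro acc; simp [pvTailPart]
  | cons seg rest ih =>
    intro acc
    simp [pvTailPart, ih, List.append_assoc]

-- ===== VERDICT =====
theorem g_forward_spec : Claim_equal_g_forward := by
  unfold Claim_equal_g_forward
  intro arr_seat _
  unfold Spec_g_forward g_forward g_forward_alt
  rw [pvGAux_foldA arr_seat 0 []]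
  simp only [List.nil_append]
  rw [← pvGAux_filter arr_seat 0]
  set f := arr_seat.filter (fun s => s = "0" || s = "1") with hf
  have hb : ∀ s ∈ f, s = "0" ∨ s = "1" := by
    intro s hs
    rw [hf] at hs
    have := List.of_mem_filter hs
    simpa using this
  rw [pvMain f hb 0 (by omega)]
  obtain ⟨seg, rest, hsr⟩ : ∃ seg rest, pvSplitRuns f = seg :: rest := by
    cases hh : pvSplitRuns f with
    | nil => exact absurd hh (pvSplitRuns_ne_nil f)
    | cons a b => exact ⟨a, b, rfl⟩
  rw [hsr]
  simp only [List.headI, List.tail, List.foldl_cons]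
  rw [pvFoldB_true rest]
  simp
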